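-- pv_equiv track=rewrite | github.com/thanhlecongg/FPEval | core/RQ2/QualityCheck/haskell_quality.py | classify_test_results
-- ===== SOURCE A (Python) =====
-- def classify_test_results(results):
--     has_compile_error = any(r[:3] == [-1, -1, -1] for r in results)
--     has_timeout = any(r[:3] == [-2, -1, -1] for r in results)
--     pass_count = sum(1 for r in results if r[0] == 0 and r[2] == 0)
--     has_failed = any(r[0] == -3 for r in results)
--
--     if pass_count > 8:
--         return "pass"
--     elif has_timeout:
--         return "timeout"
--     elif has_compile_error and pass_count <1:
--         return "compile_error"
--     elif has_failed or pass_count > 0: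
--         return "fail"
-- ===== SOURCE B (Python) =====
-- def _category(r):
--     # The four row tests of the task are mutually exclusive (they dispatch on r[0]:
--     # 0 -> pass candidate, -3 -> fail, -1,-1,-1 prefix -> compile_error, -2,-1,-1 -> timeout),
--     # so each row has exactly one category (or none).
--     if r[0] == 0:
--         return "pass" if r[2] == 0 else None
--     if r[0] == -3:
--         return "fail"
--     if r[:3] == [-1, -1, -1]:
--         return "compile_error"
--     if r[:3] == [-2, -1, -1]:
--         return "timeout"
--     return None
--
--
-- def classify_test_results(results):
--     cats = [_category(r) for r in results]
--     passes = cats.count("pass")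
--     if passes > 8:
--         return "pass"
--     if "timeout" in cats:
--         return "timeout"
--     if "compile_error" in cats and passes < 1:
--         return "compile_error"
--     if "fail" in cats or passes > 0:
--         return "fail"
-- ===== Notes on version B (the rewrite author's own statement) =====
-- stated objective: alternative
-- what changed: Instead of A's four independent whole-list scans with slice/index tests, B classifies each row once into a single exclusive category (dispatching on r[0], exploiting that A's four row tests are mutually exclusive) and then decides from the category list via count/membership.
import Mathlib
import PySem

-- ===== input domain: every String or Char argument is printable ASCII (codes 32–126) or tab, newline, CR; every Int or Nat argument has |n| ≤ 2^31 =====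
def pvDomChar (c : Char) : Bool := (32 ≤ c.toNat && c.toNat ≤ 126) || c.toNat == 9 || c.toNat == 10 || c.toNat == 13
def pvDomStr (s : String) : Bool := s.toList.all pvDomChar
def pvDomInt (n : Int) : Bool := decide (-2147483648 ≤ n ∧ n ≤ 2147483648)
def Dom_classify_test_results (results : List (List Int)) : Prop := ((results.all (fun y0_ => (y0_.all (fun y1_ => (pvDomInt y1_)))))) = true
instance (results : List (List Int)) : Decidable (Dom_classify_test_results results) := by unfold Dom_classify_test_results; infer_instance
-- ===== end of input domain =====

-- B differs from A by classifying each row ONCE into a single exclusive category and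
-- deciding from the category list; equivalence rests on A's four row tests being mutually
-- exclusive (they dispatch on r[0]).

-- ===== PORT A =====
-- Port of A: four separate scans over `results`, then the if/elif cascade (implicit None → none).
-- r[0] / r[2] use PySem.List.pyGet?; where Python would raise IndexError the inputs are
-- excluded by Pre_ below.
def classify_test_results (results : List (List Int)) : Option String :=
  let has_compile_error := results.any (fun r => PySem.List.slice r none (some 3) == [-1, -1, -1])
  let has_timeout := results.any (fun r => PySem.List.slice r none (some 3) == [-2, -1, -1])
  let pass_count := results.foldl
    (fun (acc : Int) r =>
      if PySem.List.pyGet? r 0 == some 0 && PySem.List.pyGet? r 2 == some 0 then acc + 1 else acc) 0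
  let has_failed := results.any (fun r => PySem.List.pyGet? r 0 == some (-3))
  if pass_count > 8 then some "pass"
  else if has_timeout then some "timeout"
  else if has_compile_error && pass_count < 1 then some "compile_error"
  else if has_failed || pass_count > 0 then some "fail"
  else none

-- ===== PORT B =====
-- helper _category of Source B: one exclusive category per row (dispatch on r[0])
def pvCategory (r : List Int) : Option String :=
  if PySem.List.pyGet? r 0 == some 0 then
    (if PySem.List.pyGet? r 2 == some 0 then some "pass" else none)
  else if PySem.List.pyGet? r 0 == some (-3) then some "fail"
  else if PySem.List.slice r none (some 3) == [-1, -1, -1] then some "compile_error"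
  else if PySem.List.slice r none (some 3) == [-2, -1, -1] then some "timeout"
  else none

-- Port of B: build the category list, then count/membership on it.
def classify_test_results_alt (results : List (List Int)) : Option String :=
  let cats := results.map pvCategory
  let passes : Int := PySem.List.count cats (some "pass")
  if passes > 8 then some "pass"
  else if cats.contains (some "timeout") then some "timeout"
  else if cats.contains (some "compile_error") && passes < 1 then some "compile_error"
  else if cats.contains (some "fail") || passes > 0 then some "fail"
  else none

-- ===== PRECONDITION & SPEC =====
-- Pre_ excludes exactly the inputs on which Python A raises IndexError: some row r is empty
-- (r[0]), or has r[0] == 0 but fewer than 3 entries (r[2]).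
def Pre_classify_test_results (results : List (List Int)) : Prop :=
  ∀ r ∈ results, r ≠ [] ∧ (r.headI = 0 → 3 ≤ r.length)
instance (results : List (List Int)) : Decidable (Pre_classify_test_results results) := by
  unfold Pre_classify_test_results; infer_instance
def pvWitness_classify_test_results : List (List Int) := [[0, 0, 0], [-3, -1, -1]]
def Spec_classify_test_results (results : List (List Int)) (out : Option String) : Prop := out = classify_test_results_alt results
instance (results : List (List Int)) (out : Option String) : Decidable (Spec_classify_test_results results out) := by unfold Spec_classify_test_results; infer_instance

-- ===== CLAIM (what is proved, stated in full; the proofs are below) =====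
def Claim_equal_classify_test_results : Prop := ∀ (results : List (List Int)), Dom_classify_test_results results → Pre_classify_test_results results → Spec_classify_test_results results (classify_test_results results)

-- ===== LEMMAS AND PROOFS =====
-- The four per-row characterisations: each of A's row tests holds iff pvCategory assigns
-- the corresponding category (mutual exclusivity via r[0]).
theorem pvCat_pass (r : List Int) :
    (pvCategory r == some "pass")
      = (PySem.List.pyGet? r 0 == some 0 && PySem.List.pyGet? r 2 == some 0) := by
  unfold pvCategory; split_ifs <;> simp_all

theorem pvCat_fail (r : List Int) :
    (pvCategory r == some "fail") = (PySem.List.pyGet? r 0 == some (-3)) := by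
  unfold pvCategory
  split_ifs with h1 h2 h3 <;> simp_all

theorem pvSlice3_head (r : List Int) (a b c : Int)
    (h : PySem.List.slice r none (some 3) = [a, b, c]) :
    PySem.List.pyGet? r 0 = some a := by
  rw [show (some (3 : Int)) = some ((3 : Nat) : Int) from rfl, PySem.List.slice_to_natCast] at h
  rcases r with _ | ⟨x, t⟩ <;> simp_all

theorem pvCat_ce (r : List Int) :
    (pvCategory r == some "compile_error")
      = (PySem.List.slice r none (some 3) == [-1, -1, -1]) := by
  unfold pvCategory
  split_ifs with h1 h2 h3 <;> simp_all
  all_goals intro h; all_goals have := pvSlice3_head r _ _ _ h; all_goals simp_all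

theorem pvCat_to (r : List Int) :
    (pvCategory r == some "timeout")
      = (PySem.List.slice r none (some 3) == [-2, -1, -1]) := by
  unfold pvCategory
  split_ifs with h1 h2 h3 h4 <;> simp_all
  all_goals intro h; all_goals have := pvSlice3_head r _ _ _ h; all_goals simp_all

theorem pvContains_map (l : List (List Int)) (x : Option String) :
    (l.map pvCategory).contains x = l.any (fun r => pvCategory r == x) := by
  induction l with
  | nil => rfl
  | cons r t ih =>
    simp only [List.map_cons, List.contains_cons, List.any_cons, ih]
    rw [BEq.comm]

-- ===== VERDICT (by name: the statement is the Claim_ definition above) =====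
theorem classify_test_results_spec : Claim_equal_classify_test_results := by
  intro results _ _
  unfold Spec_classify_test_results classify_test_results classify_test_results_alt
  simp only [PySem.List.foldl_if_add_one, PySem.List.count_eq, List.count_eq_countP,
    List.countP_map, pvContains_map, Function.comp_def,
    pvCat_pass, pvCat_fail, pvCat_ce, pvCat_to, zero_add]
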